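-- pv_equiv track=rewrite | github.com/mforman/advent-of-code | 2020/12.py | move_with_waypoint
-- ===== SOURCE A (Python) =====
-- HEADINGS = {"N": (1, 0), "S": (-1, 0), "E": (0, 1), "W": (0, -1)}
--
-- def scale_tuple(t, s):
--     return tuple(s * x for x in t)
--
-- def add_tuples(t1, t2):
--     return tuple(map(sum, zip(t1, t2)))
--
-- def rotate(waypoint, direction):
--     a, b = waypoint
--     if direction == "L":
--         return (b, -a)
--     else:
--         return (-b, a)
--
-- def move_with_waypoint(pos, waypoint, instruction):
--     action, amount = instruction
--     if action in ["L", "R"]: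
--         wp = waypoint
--         for _ in range(amount // 90):
--             wp = rotate(wp, action)
--         return (pos, wp)
--     elif action == "F":
--         m = scale_tuple(waypoint, amount)
--         return (add_tuples(pos, m), waypoint)
--     else:
--         m = scale_tuple(HEADINGS[action], amount)
--         return (pos, add_tuples(waypoint, m))
-- ===== SOURCE B (Python) =====
-- HEADINGS = {"N": (1, 0), "S": (-1, 0), "E": (0, 1), "W": (0, -1)}
--
-- def move_with_waypoint(pos, waypoint, instruction):
--     action, amount = instruction
--     a, b = waypoint
--     if action in ("L", "R"):
--         r = (amount // 90) % 4          # signed quarter turns, normalised to 0..3 left turns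
--         if action == "R":
--             r = -r % 4
--         if r == 1:
--             wp = (b, -a)
--         elif r == 2:
--             wp = (-a, -b)
--         elif r == 3:
--             wp = (-b, a)
--         else:
--             wp = (a, b)
--         return (pos, wp)
--     if action == "F":
--         return ((pos[0] + amount * a, pos[1] + amount * b), waypoint)
--     da, db = HEADINGS[action]
--     return (pos, (a + amount * da, b + amount * db))
-- ===== Notes on version B (the rewrite author's own statement) =====
-- stated objective: simpler
-- what changed: Replaced A's rotate-one-quarter-turn-at-a-time loop over range(amount//90) with a closed-form signed quarter-turn count r = (amount//90) % 4 (negated mod 4 for R) selecting the rotated waypoint directly; F and heading branches become direct tuple arithmetic without the scale/add helpers. Pre_ excludes only actions outside the seven instruction letters, where A raises KeyError.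
-- intended difference: On L/R instructions with a negative amount that is not a whole number of full turns (and a nonzero waypoint), A returns the waypoint unrotated because range(negative) is empty, while B applies the signed rotation (e.g. L -90 = R 90), which is the intended meaning of a negative turn. — e.g. on move_with_waypoint((0, 0), (1, 0), ("L", -90)): A returns ((0, 0), (1, 0)), B returns ((0, 0), (0, 1))
import Mathlib
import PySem

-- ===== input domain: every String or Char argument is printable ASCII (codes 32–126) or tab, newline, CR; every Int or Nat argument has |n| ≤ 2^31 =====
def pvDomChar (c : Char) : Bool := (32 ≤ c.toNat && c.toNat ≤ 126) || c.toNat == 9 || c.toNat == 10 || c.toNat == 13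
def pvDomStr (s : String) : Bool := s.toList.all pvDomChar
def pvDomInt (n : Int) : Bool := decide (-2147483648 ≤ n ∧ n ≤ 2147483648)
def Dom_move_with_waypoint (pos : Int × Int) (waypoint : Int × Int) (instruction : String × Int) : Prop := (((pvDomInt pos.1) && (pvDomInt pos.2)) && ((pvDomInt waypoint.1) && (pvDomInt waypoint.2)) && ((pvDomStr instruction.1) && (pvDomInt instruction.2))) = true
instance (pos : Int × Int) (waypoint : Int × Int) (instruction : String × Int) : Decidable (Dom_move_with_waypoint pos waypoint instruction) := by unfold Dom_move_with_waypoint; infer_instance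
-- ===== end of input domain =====

-- B replaces A's one-quarter-turn-at-a-time rotation loop by a closed-form signed
-- quarter-turn count (simpler, no loop); on negative rotation amounts A silently
-- does nothing while B performs the signed rotation (see D_ below).

-- ===== PORT A =====
def pvHeadingsA : PySem.Dict String (Int × Int) :=
  PySem.Dict.ofList [("N", ((1 : Int), (0 : Int))), ("S", (-1, 0)), ("E", (0, 1)), ("W", (0, -1))]

def pvRotateA (waypoint : Int × Int) (direction : String) : Int × Int :=
  if direction = "L" then (waypoint.2, -waypoint.1) else (-waypoint.2, waypoint.1)

def move_with_waypoint (pos : Int × Int) (waypoint : Int × Int) (instruction : String × Int) : (Int × Int) × (Int × Int) :=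
  let action := instruction.1
  let amount := instruction.2
  if action = "L" ∨ action = "R" then
    -- for _ in range(amount // 90): wp = rotate(wp, action)   (range of a non-positive int is empty)
    let wp := (List.range (PySem.Int.floordiv amount 90).toNat).foldl
      (fun wp _ => pvRotateA wp action) waypoint
    (pos, wp)
  else if action = "F" then
    let m := (amount * waypoint.1, amount * waypoint.2)      -- scale_tuple(waypoint, amount)
    ((pos.1 + m.1, pos.2 + m.2), waypoint)                   -- add_tuples(pos, m)
  else
    match PySem.Dict.get? pvHeadingsA action with
    | some h =>
        let m := (amount * h.1, amount * h.2)
        (pos, (waypoint.1 + m.1, waypoint.2 + m.2))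
    | none => (pos, waypoint)  -- KeyError in Python; excluded by Pre_

-- ===== PORT B =====
def pvHeadingsB : PySem.Dict String (Int × Int) :=
  PySem.Dict.ofList [("N", ((1 : Int), (0 : Int))), ("S", (-1, 0)), ("E", (0, 1)), ("W", (0, -1))]

def move_with_waypoint_alt (pos : Int × Int) (waypoint : Int × Int) (instruction : String × Int) : (Int × Int) × (Int × Int) :=
  let action := instruction.1
  let amount := instruction.2
  let a := waypoint.1
  let b := waypoint.2
  if action = "L" ∨ action = "R" then
    let r0 := PySem.Int.mod (PySem.Int.floordiv amount 90) 4
    let r := if action = "R" then PySem.Int.mod (-r0) 4 else r0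
    let wp : Int × Int :=
      if r = 1 then (b, -a)
      else if r = 2 then (-a, -b)
      else if r = 3 then (-b, a)
      else (a, b)
    (pos, wp)
  else if action = "F" then
    ((pos.1 + amount * a, pos.2 + amount * b), waypoint)
  else
    match PySem.Dict.get? pvHeadingsB action with
    | some h => (pos, (a + amount * h.1, b + amount * h.2))
    | none => ((0, 0), (0, 0))  -- KeyError in Python; excluded by Pre_

-- ===== PRECONDITION & SPEC =====
-- Pre_ excludes exactly the inputs where Python A raises KeyError: an action outside
-- the seven instruction letters (HEADINGS lookup fails).  B raises there too.
def Pre_move_with_waypoint (pos : Int × Int) (waypoint : Int × Int) (instruction : String × Int) : Prop :=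
  instruction.1 ∈ (["L", "R", "F", "N", "S", "E", "W"] : List String)
instance (pos : Int × Int) (waypoint : Int × Int) (instruction : String × Int) : Decidable (Pre_move_with_waypoint pos waypoint instruction) := by unfold Pre_move_with_waypoint; infer_instance
def pvWitness_move_with_waypoint : (Int × Int) × (Int × Int) × (String × Int) := ((3, 4), (1, 10), ("R", 270))

-- On L/R instructions with a negative amount whose quarter-turn count is not a multiple of 4
-- (and a nonzero waypoint), A returns the waypoint unrotated because range(negative) is empty,
-- while B performs the signed rotation, which is the intended meaning of a negative turn.
def D_move_with_waypoint (pos : Int × Int) (waypoint : Int × Int) (instruction : String × Int) : Prop :=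
  (instruction.1 = "L" ∨ instruction.1 = "R") ∧ waypoint ≠ (0, 0) ∧ instruction.2 < 0 ∧
    PySem.Int.mod (PySem.Int.floordiv instruction.2 90) 4 ≠ 0
instance (pos : Int × Int) (waypoint : Int × Int) (instruction : String × Int) : Decidable (D_move_with_waypoint pos waypoint instruction) := by unfold D_move_with_waypoint; infer_instance

def Spec_move_with_waypoint (pos : Int × Int) (waypoint : Int × Int) (instruction : String × Int) (out : (Int × Int) × (Int × Int)) : Prop := ¬ D_move_with_waypoint pos waypoint instruction → out = move_with_waypoint_alt pos waypoint instruction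
instance (pos : Int × Int) (waypoint : Int × Int) (instruction : String × Int) (out : (Int × Int) × (Int × Int)) : Decidable (Spec_move_with_waypoint pos waypoint instruction out) := by unfold Spec_move_with_waypoint; infer_instance

def pvDiffWitness_move_with_waypoint : (Int × Int) × (Int × Int) × (String × Int) := ((0, 0), (1, 0), ("L", -90))
def pvDiffWitnessOut_move_with_waypoint : ((Int × Int) × (Int × Int)) × ((Int × Int) × (Int × Int)) := (((0, 0), (1, 0)), ((0, 0), (0, 1)))

-- ===== CLAIM (what is proved, stated in full; the proofs are below) =====
def Claim_unchanged_move_with_waypoint : Prop := ∀ (pos : Int × Int) (waypoint : Int × Int) (instruction : String × Int), Dom_move_with_waypoint pos waypoint instruction → Pre_move_with_waypoint pos waypoint instruction → Spec_move_with_waypoint pos waypoint instruction (move_with_waypoint pos waypoint instruction)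
def Claim_changed_move_with_waypoint : Prop := Dom_move_with_waypoint (pvDiffWitness_move_with_waypoint.1) (pvDiffWitness_move_with_waypoint.2.1) (pvDiffWitness_move_with_waypoint.2.2) ∧ Pre_move_with_waypoint (pvDiffWitness_move_with_waypoint.1) (pvDiffWitness_move_with_waypoint.2.1) (pvDiffWitness_move_with_waypoint.2.2) ∧ D_move_with_waypoint (pvDiffWitness_move_with_waypoint.1) (pvDiffWitness_move_with_waypoint.2.1) (pvDiffWitness_move_with_waypoint.2.2) ∧ move_with_waypoint (pvDiffWitness_move_with_waypoint.1) (pvDiffWitness_move_with_waypoint.2.1) (pvDiffWitness_move_with_waypoint.2.2) = pvDiffWitnessOut_move_with_waypoint.1 ∧ move_with_waypoint_alt (pvDiffWitness_move_with_waypoint.1) (pvDiffWitness_move_with_waypoint.2.1) (pvDiffWitness_move_with_waypoint.2.2) = pvDiffWitnessOut_move_with_waypoint.2 ∧ pvDiffWitnessOut_move_with_waypoint.1 ≠ pvDiffWitnessOut_move_with_waypoint.2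
def Claim_exact_move_with_waypoint : Prop := ∀ (pos : Int × Int) (waypoint : Int × Int) (instruction : String × Int), Dom_move_with_waypoint pos waypoint instruction → Pre_move_with_waypoint pos waypoint instruction → D_move_with_waypoint pos waypoint instruction → move_with_waypoint pos waypoint instruction ≠ move_with_waypoint_alt pos waypoint instruction

-- ===== LEMMAS AND PROOFS =====

-- iterating A's quarter turn k times gives the table entry at k % 4 (direction L)
theorem pv_foldL (k : Nat) (a b : Int) :
    (List.range k).foldl (fun wp _ => pvRotateA wp "L") (a, b) =
      (if k % 4 = 0 then (a, b) else if k % 4 = 1 then (b, -a)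
       else if k % 4 = 2 then (-a, -b) else (-b, a)) := by
  induction k with
  | zero => simp
  | succ k ih =>
    rw [List.range_succ, List.foldl_append, ih]
    have h4 : k % 4 = 0 ∨ k % 4 = 1 ∨ k % 4 = 2 ∨ k % 4 = 3 := by omega
    rcases h4 with h | h | h | h <;>
      · have h' : (k + 1) % 4 = (k % 4 + 1) % 4 := by omega
        simp [pvRotateA, h, h']

-- iterating A's quarter turn k times gives the table entry at k % 4 (direction R)
theorem pv_foldR (k : Nat) (a b : Int) :
    (List.range k).foldl (fun wp _ => pvRotateA wp "R") (a, b) =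
      (if k % 4 = 0 then (a, b) else if k % 4 = 1 then (-b, a)
       else if k % 4 = 2 then (-a, -b) else (b, -a)) := by
  induction k with
  | zero => simp
  | succ k ih =>
    rw [List.range_succ, List.foldl_append, ih]
    have h4 : k % 4 = 0 ∨ k % 4 = 1 ∨ k % 4 = 2 ∨ k % 4 = 3 := by omega
    rcases h4 with h | h | h | h <;>
      · have h' : (k + 1) % 4 = (k % 4 + 1) % 4 := by omega
        simp [pvRotateA, h, h']

-- ===== VERDICT (by name: the statement is the Claim_ definition above) =====
theorem move_with_waypoint_spec : Claim_unchanged_move_with_waypoint := by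
  intro pos waypoint instruction _ hpre
  unfold Spec_move_with_waypoint
  intro hnD
  unfold move_with_waypoint move_with_waypoint_alt
  by_cases hLR : instruction.1 = "L" ∨ instruction.1 = "R"
  · simp only [if_pos hLR]
    set n := PySem.Int.floordiv instruction.2 90 with hn
    have hr0 : PySem.Int.mod n 4 = n % 4 := PySem.Int.mod_eq_emod_of_pos (by norm_num)
    by_cases hneg : instruction.2 < 0
    · -- A's loop is empty; ¬D forces waypoint = (0,0) or a whole number of full turns
      have hn0 : n < 0 := by
        rw [hn, PySem.Int.floordiv_eq_ediv_of_pos (by norm_num)]; omega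
      have hk : n.toNat = 0 := by omega
      have hd : waypoint = (0, 0) ∨ n % 4 = 0 := by
        unfold D_move_with_waypoint at hnD
        by_cases hw : waypoint = (0, 0)
        · exact Or.inl hw
        · right
          by_contra hm
          exact hnD ⟨hLR, hw, hneg, by rw [hr0]; exact hm⟩
      rcases hd with hw | hm
      · rcases hLR with h | h <;>
          simp [h, hk, hw, hr0, Prod.ext_iff] <;> split_ifs <;> simp [PySem.Int.mod]
      · have hmz : PySem.Int.mod (-(n % 4)) 4 = -(n % 4) % 4 :=
          PySem.Int.mod_eq_emod_of_pos (by norm_num)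
        rcases hLR with h | h <;> simp [h, hk, hr0, hm, hmz]
    · -- n ≥ 0; A's loop runs n times, period 4
      have hn0 : 0 ≤ n := by
        rw [hn, PySem.Int.floordiv_eq_ediv_of_pos (by norm_num)]; omega
      have hcast : (n.toNat : Int) = n := Int.toNat_of_nonneg hn0
      have hmodc : (n % 4) = ((n.toNat % 4 : Nat) : Int) := by omega
      have h4 : n.toNat % 4 = 0 ∨ n.toNat % 4 = 1 ∨ n.toNat % 4 = 2 ∨ n.toNat % 4 = 3 := by omega
      have hmz : ∀ r : Int, 0 ≤ r → r < 4 → PySem.Int.mod (-r) 4 = -r % 4 := fun r _ _ =>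
        PySem.Int.mod_eq_emod_of_pos (by norm_num)
      rcases hLR with h | h
      · rw [h, pv_foldL]
        rcases h4 with h' | h' | h' | h' <;>
          simp [hr0, hmodc, h'] <;> norm_num
      · rw [h, pv_foldR]
        have f1 : ((-1 : Int)).fmod 4 = 3 := by decide
        have f2 : ((-2 : Int)).fmod 4 = 2 := by decide
        have f3 : ((-3 : Int)).fmod 4 = 1 := by decide
        rcases h4 with h' | h' | h' | h' <;>
          · rw [hr0, hmodc, h']
            norm_num [PySem.Int.mod, f1, f2, f3]
  · simp only [if_neg hLR]
    by_cases hF : instruction.1 = "F"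
    · simp [hF]
    · simp only [if_neg hF]
      unfold Pre_move_with_waypoint at hpre
      simp only [List.mem_cons, List.not_mem_nil, or_false] at hpre
      rcases hpre with h | h | h | h | h | h | h
      · exact absurd (Or.inl h) hLR
      · exact absurd (Or.inr h) hLR
      · exact absurd h hF
      all_goals (rw [h]; rfl)

theorem move_with_waypoint_changed : Claim_changed_move_with_waypoint := by
  unfold Claim_changed_move_with_waypoint; decide

theorem move_with_waypoint_tight : Claim_exact_move_with_waypoint := by
  intro pos waypoint instruction _ _ hD
  obtain ⟨hLR, hw, hneg, hm⟩ := hD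
  unfold move_with_waypoint move_with_waypoint_alt
  simp only [if_pos hLR]
  set n := PySem.Int.floordiv instruction.2 90 with hn
  have hn0 : n < 0 := by
    rw [hn, PySem.Int.floordiv_eq_ediv_of_pos (by norm_num)]; omega
  have hk : n.toNat = 0 := by omega
  have hr0 : PySem.Int.mod n 4 = n % 4 := PySem.Int.mod_eq_emod_of_pos (by norm_num)
  have hr : n % 4 = 1 ∨ n % 4 = 2 ∨ n % 4 = 3 := by
    rw [hr0] at hm; omega
  have hw' : waypoint.1 ≠ 0 ∨ waypoint.2 ≠ 0 := by
    by_contra h; push_neg at h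
    exact hw (Prod.ext h.1 h.2)
  rcases hLR with h | h <;> rw [h] <;> simp only [hk, List.range_zero, List.foldl_nil] <;>
    rcases hr with h' | h' | h' <;>
      · intro heq
        rw [hr0, h'] at heq
        simp [PySem.Int.mod, Prod.ext_iff] at heq
        omega
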